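-- pv_equiv track=rewrite | github.com/fenixguard/yandex_algorithms | sprint_1/chaotic_weather.py | get_weather_randomness
-- ===== SOURCE A (Python) =====
-- from typing import List
--
-- def get_weather_randomness(temperatures: List[int]) -> int:
--     days = len(temperatures)
--     if days == 1:
--         return 1
--     havoc_days = 0
--     for d in range(days):
--         if d == 0:
--             if temperatures[d] > temperatures[d + 1]:
--                 havoc_days += 1
--         elif d == days - 1:
--             if temperatures[d - 1] < temperatures[d]:
--                 havoc_days += 1
--         else:
--             if temperatures[d - 1] < temperatures[d] > temperatures[d + 1]:
--                 havoc_days += 1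
--
--     return havoc_days
-- ===== SOURCE B (Python) =====
-- from typing import List
--
-- def get_weather_randomness(temperatures: List[int]) -> int:
--     # Encode the consecutive comparisons as a string of '<', '>', '=' symbols,
--     # wrap it in '<' ... '>', and count occurrences of the substring "<>":
--     # each chaotic (peak) day is exactly one rise immediately followed by a fall.
--     if not temperatures:
--         return 0
--     signs = ''.join('<' if a < b else '>' if a > b else '='
--                     for a, b in zip(temperatures, temperatures[1:]))
--     return ('<' + signs + '>').count('<>')
-- ===== Notes on version B (the rewrite author's own statement) =====
-- stated objective: alternative
-- what changed: Replaces A's three-branch indexed loop and single-day early return by a symbolic encoding: build a string of '<'/'>'/'=' comparison symbols for consecutive days, wrap it in '<'...'>', and count occurrences of the substring "<>" with str.count.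
import Mathlib
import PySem

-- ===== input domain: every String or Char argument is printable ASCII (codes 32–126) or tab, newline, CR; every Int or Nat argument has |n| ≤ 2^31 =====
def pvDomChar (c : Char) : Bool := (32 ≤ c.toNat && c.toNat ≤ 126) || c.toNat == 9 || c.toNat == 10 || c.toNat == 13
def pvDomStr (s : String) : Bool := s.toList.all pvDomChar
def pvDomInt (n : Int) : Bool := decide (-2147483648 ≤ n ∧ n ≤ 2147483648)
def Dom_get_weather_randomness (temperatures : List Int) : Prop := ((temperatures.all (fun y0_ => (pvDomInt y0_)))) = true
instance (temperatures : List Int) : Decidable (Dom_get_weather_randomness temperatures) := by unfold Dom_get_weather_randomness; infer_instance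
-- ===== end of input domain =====

-- B replaces A's three-branch indexed loop and single-day early return by a symbolic encoding:
-- a string of '<'/'>'/'=' comparison symbols wrapped in '<'…'>' in which it counts the
-- substring "<>" (objective: alternative).
-- ===== PORT A =====
-- Port of A: three-branch indexed loop with an early return for a single day.
def get_weather_randomness (temperatures : List Int) : Int :=
  let days : Int := temperatures.length
  if days = 1 then 1
  else
    (PySem.List.pyRange 0 days 1).foldl (fun havoc_days d =>
      if d = 0 then
        if PySem.List.pyGetD temperatures d 0 > PySem.List.pyGetD temperatures (d + 1) 0 then
          havoc_days + 1
        else havoc_days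
      else if d = days - 1 then
        if PySem.List.pyGetD temperatures (d - 1) 0 < PySem.List.pyGetD temperatures d 0 then
          havoc_days + 1
        else havoc_days
      else
        if PySem.List.pyGetD temperatures (d - 1) 0 < PySem.List.pyGetD temperatures d 0 ∧
            PySem.List.pyGetD temperatures d 0 > PySem.List.pyGetD temperatures (d + 1) 0 then
          havoc_days + 1
        else havoc_days) 0

-- ===== PORT B =====
-- `'<' if a < b else '>' if a > b else '='`
def signChar (p : Int × Int) : Char :=
  if p.1 < p.2 then '<' else if p.1 > p.2 then '>' else '='

-- Port of B: build the comparison-symbol string for zip(temperatures, temperatures[1:]),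
-- wrap it in '<' … '>' and count the substring "<>" (str.count = PySem.Chars.count).
def get_weather_randomness_alt (temperatures : List Int) : Int :=
  if temperatures = [] then 0
  else
    let signs : List Char :=
      (temperatures.zip (PySem.List.slice temperatures (some 1) none)).map signChar
    ((PySem.Chars.count ('<' :: (signs ++ ['>'])) ['<', '>'] : Nat) : Int)

-- ===== PRECONDITION & SPEC =====
def Spec_get_weather_randomness (temperatures : List Int) (out : Int) : Prop := out = get_weather_randomness_alt temperatures
instance (temperatures : List Int) (out : Int) : Decidable (Spec_get_weather_randomness temperatures out) := by unfold Spec_get_weather_randomness; infer_instance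

-- ===== CLAIM (what is proved, stated in full; the proofs are below) =====
def Claim_equal_get_weather_randomness : Prop := ∀ (temperatures : List Int), Dom_get_weather_randomness temperatures → Spec_get_weather_randomness temperatures (get_weather_randomness temperatures)

-- ===== LEMMAS AND PROOFS =====

-- A's merged loop condition at index d (how a single loop step changes the accumulator)
abbrev condA (ts : List Int) (days d : Int) : Prop :=
  (d = 0 ∧ PySem.List.pyGetD ts d 0 > PySem.List.pyGetD ts (d + 1) 0) ∨
  (d ≠ 0 ∧ d = days - 1 ∧ PySem.List.pyGetD ts (d - 1) 0 < PySem.List.pyGetD ts d 0) ∨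
  (d ≠ 0 ∧ d ≠ days - 1 ∧ PySem.List.pyGetD ts (d - 1) 0 < PySem.List.pyGetD ts d 0 ∧
    PySem.List.pyGetD ts d 0 > PySem.List.pyGetD ts (d + 1) 0)

lemma slice_one (xs : List Int) : PySem.List.slice xs (some 1) none = xs.drop 1 := by
  rw [PySem.List.slice_from xs (by norm_num)]
  norm_num

-- the number of adjacent pairs ('<','>') in a char list
def pairCount (l : List Char) : Nat :=
  (l.zip l.tail).countP (fun p => p.1 == '<' && p.2 == '>')

-- the padded symbol list B counts in
def padC (ts : List Int) : List Char :=
  '<' :: ((ts.zip (ts.drop 1)).map signChar ++ ['>'])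

lemma pairCount_nil : pairCount [] = 0 := rfl

lemma pairCount_cons_of_not_match (a : Char) (t : List Char)
    (h : ¬ (a = '<' ∧ t.head? = some '>')) : pairCount (a :: t) = pairCount t := by
  cases t with
  | nil => rfl
  | cons b t2 =>
    unfold pairCount
    simp only [List.tail_cons, List.zip_cons_cons, List.countP_cons]
    have : (a == '<' && b == '>') = false := by
      simp only [List.head?_cons, Option.some.injEq] at h
      by_cases ha : a = '<' <;> by_cases hb : b = '>'
      · exact absurd ⟨ha, hb⟩ h
      · simp [hb]
      · simp [ha]
      · simp [ha]
    simp [this]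

lemma pairCount_match (t2 : List Char) :
    pairCount ('<' :: '>' :: t2) = 1 + pairCount t2 := by
  have h2 : pairCount ('>' :: t2) = pairCount t2 :=
    pairCount_cons_of_not_match _ _ (by simp)
  unfold pairCount
  simp only [List.tail_cons, List.zip_cons_cons, List.countP_cons]
  simp only [show ('<' == '<' && '>' == '>') = true from rfl, if_pos]
  unfold pairCount at h2
  simp only [List.tail_cons] at h2
  omega

lemma count_go_eq (fuel : Nat) : ∀ (l : List Char) (acc : Nat), l.length ≤ fuel →
    PySem.Chars.count.go ['<', '>'] fuel l acc = acc + pairCount l := by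
  induction fuel with
  | zero =>
    intro l acc h
    have : l = [] := List.length_eq_zero_iff.mp (Nat.le_zero.mp h)
    subst this
    rw [PySem.Chars.count.go.eq_def]
    simp [pairCount_nil]
  | succ fuel ih =>
    intro l acc h
    cases l with
    | nil => rw [PySem.Chars.count.go.eq_def]; simp [pairCount_nil]
    | cons a t =>
      rw [PySem.Chars.count.go.eq_def]
      simp only []
      by_cases hp : List.isPrefixOf ['<', '>'] (a :: t) = true
      · rw [if_pos hp]
        obtain ⟨b, t2, rfl⟩ : ∃ b t2, t = b :: t2 := by
          cases t with
          | nil => simp [List.isPrefixOf] at hp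
          | cons b t2 => exact ⟨b, t2, rfl⟩
        have ha : '<' = a ∧ '>' = b := by simpa [List.isPrefixOf] using hp
        obtain ⟨rfl, rfl⟩ := ha
        have hlen : t2.length ≤ fuel := by simp at h; omega
        simp only [List.length_cons, List.length_nil, List.drop_succ_cons, List.drop_zero]
        rw [ih t2 (acc + 1) hlen, pairCount_match]
        omega
      · rw [if_neg hp]
        have hlen : t.length ≤ fuel := by simp at h; omega
        rw [ih t acc hlen]
        have hnm : ¬ (a = '<' ∧ t.head? = some '>') := by
          rintro ⟨rfl, hh⟩
          apply hp
          cases t with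
          | nil => simp at hh
          | cons b t2 =>
            simp only [List.head?_cons, Option.some.injEq] at hh
            subst hh
            simp [List.isPrefixOf]
        rw [pairCount_cons_of_not_match a t hnm]

lemma count_eq_pairCount (l : List Char) :
    PySem.Chars.count l ['<', '>'] = pairCount l := by
  unfold PySem.Chars.count
  rw [if_neg (by simp)]
  simpa using count_go_eq l.length l 0 (le_refl _)

lemma zip_tail_eq_map_range (l : List Char) :
    l.zip l.tail = (List.range (l.length - 1)).map
      (fun j => (l.getD j ' ', l.getD (j + 1) ' ')) := by
  apply List.ext_getElem
  · simp [List.length_zip, List.length_tail]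
  · intro i h1 h2
    have hi : i + 1 < l.length := by
      simp [List.length_zip, List.length_tail] at h1; omega
    simp only [List.getElem_zip, List.getElem_map, List.getElem_range, List.getElem_tail]
    refine Prod.ext ?_ ?_
    · exact (List.getD_eq_getElem _ _ (by omega)).symm
    · exact (List.getD_eq_getElem _ _ hi).symm

lemma length_padC (ts : List Int) (h : 1 ≤ ts.length) :
    (padC ts).length = ts.length + 1 := by
  simp [padC]
  omega

lemma padC_getD (ts : List Int) (j : Nat) (h1 : 1 ≤ ts.length) (h2 : j ≤ ts.length) :
    (padC ts).getD j ' ' =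
      if j = 0 then '<'
      else if j = ts.length then '>'
      else signChar (ts.getD (j - 1) 0, ts.getD j 0) := by
  unfold padC
  rcases j with _ | k
  · simp
  · simp only [List.getD_cons_succ]
    rw [if_neg (by omega)]
    have hzlen : ((ts.zip (ts.drop 1)).map signChar).length = ts.length - 1 := by
      rw [List.length_map, List.length_zip, List.length_drop]; omega
    by_cases hk : k < ts.length - 1
    · rw [List.getD_append _ _ _ _ (by omega)]
      rw [if_neg (by omega)]
      rw [List.getD_eq_getElem _ _ (by omega)]
      simp only [List.getElem_map, List.getElem_zip, List.getElem_drop]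
      rw [List.getD_eq_getElem _ _ (by omega), List.getD_eq_getElem _ _ (by omega)]
      simp only [Nat.add_sub_cancel, Nat.add_comm 1 k]
    · have hk' : k = ts.length - 1 := by omega
      subst hk'
      rw [if_pos (by omega)]
      rw [List.getD_eq_getElem?_getD, List.getElem?_append_right (by omega)]
      simp

lemma signChar_eq_lt (p : Int × Int) : (signChar p == '<') = decide (p.1 < p.2) := by
  unfold signChar
  split_ifs <;> simp <;> omega

lemma signChar_eq_gt (p : Int × Int) : (signChar p == '>') = decide (p.1 > p.2) := by
  unfold signChar
  split_ifs <;> simp <;> omega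

lemma cond_agree (ts : List Int) (i : Nat) (hi : i < ts.length) (hn : ts.length ≠ 1) :
    decide (condA ts ts.length i) =
      ((padC ts).getD i ' ' == '<' && (padC ts).getD (i + 1) ' ' == '>') := by
  have h1 : 1 ≤ ts.length := by omega
  have hn2 : 2 ≤ ts.length := by omega
  rw [padC_getD ts i h1 (by omega), padC_getD ts (i + 1) h1 (by omega)]
  rw [if_neg (by omega : ¬ (i + 1 = 0))]
  rcases Nat.eq_zero_or_pos i with h0 | h0
  · subst h0
    rw [if_pos rfl, if_neg (by omega)]
    simp only [condA, Nat.cast_zero, signChar_eq_gt, Nat.zero_add, Nat.sub_self]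
    have e2 : (0 : Int) + 1 = ((1 : Nat) : Int) := by norm_num
    simp only [e2, PySem.List.pyGetD_natCast, List.getD_eq_getElem?_getD]
    rw [show (0 : Int) = ((0 : Nat) : Int) from rfl, PySem.List.pyGetD_natCast]
    simp [List.getD_eq_getElem?_getD]
  · have hne0 : ((i : Int)) ≠ 0 := by omega
    have e1 : ((i : Nat) : Int) - 1 = (((i - 1 : Nat)) : Int) := by omega
    rw [if_neg (by omega : ¬ (i = 0)), if_neg (by omega : ¬ (i = ts.length))]
    by_cases hl : i = ts.length - 1
    · have hle : ((i : Int)) = (ts.length : Int) - 1 := by omega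
      rw [if_pos (by omega : i + 1 = ts.length)]
      simp only [condA, e1, PySem.List.pyGetD_natCast, signChar_eq_lt]
      simp only [List.getD_eq_getElem?_getD]
      simp [hle, show ((ts.length : Int)) - 1 ≠ 0 by omega]
    · have hle : ((i : Int)) ≠ (ts.length : Int) - 1 := by omega
      rw [if_neg (by omega : ¬ (i + 1 = ts.length))]
      have e2 : ((i : Nat) : Int) + 1 = (((i + 1 : Nat)) : Int) := by omega
      simp only [condA, e1, e2, PySem.List.pyGetD_natCast, signChar_eq_lt, signChar_eq_gt]
      simp only [List.getD_eq_getElem?_getD, Nat.add_sub_cancel]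
      simp [hle, show ¬ i = 0 by omega, Bool.and_comm]

-- ===== VERDICT (by name: the statement is the Claim_ definition above) =====
theorem get_weather_randomness_spec : Claim_equal_get_weather_randomness := by
  intro ts _
  unfold Spec_get_weather_randomness get_weather_randomness get_weather_randomness_alt
  by_cases h0 : ts = []
  · subst h0
    simp [PySem.List.pyRange]
  · rw [if_neg h0]
    have hpos : 1 ≤ ts.length := by
      cases ts with
      | nil => exact absurd rfl h0
      | cons a t => simp
    simp only [slice_one]
    rw [show '<' :: (List.map signChar (ts.zip (ts.drop 1)) ++ ['>']) = padC ts from rfl,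
      count_eq_pairCount]
    by_cases h1 : ts.length = 1
    · obtain ⟨x, rfl⟩ := List.length_eq_one_iff.mp h1
      simp [padC, pairCount]
    · rw [if_neg (by exact_mod_cast h1)]
      have hbody : ∀ (havoc d : Int), d ∈ PySem.List.pyRange 0 (ts.length : Int) 1 →
          (if d = 0 then
            if PySem.List.pyGetD ts d 0 > PySem.List.pyGetD ts (d + 1) 0 then havoc + 1 else havoc
          else if d = (ts.length : Int) - 1 then
            if PySem.List.pyGetD ts (d - 1) 0 < PySem.List.pyGetD ts d 0 then havoc + 1 else havoc
          else
            if PySem.List.pyGetD ts (d - 1) 0 < PySem.List.pyGetD ts d 0 ∧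
                PySem.List.pyGetD ts d 0 > PySem.List.pyGetD ts (d + 1) 0 then havoc + 1 else havoc)
          = if condA ts ts.length d then havoc + 1 else havoc := by
        intro havoc d _
        unfold condA
        split_ifs with h2 h3 h4 h5 h6 h7 h8 <;> first | rfl | (exfalso; omega)
      rw [PySem.List.foldl_congr_mem _ _ _ _ (fun acc x hx => hbody acc x hx),
        PySem.List.foldl_ite_add_one,
        PySem.List.pyRange_zero_nat, List.countP_map]
      unfold pairCount
      rw [zip_tail_eq_map_range, List.countP_map, length_padC ts hpos]
      simp only [Nat.add_sub_cancel]
      rw [List.countP_congr (fun i hi => by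
        simp only [Function.comp]
        rw [cond_agree ts i (List.mem_range.mp hi) h1])]
      simp only [Function.comp_def]
      omega
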